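-- pv_equiv track=rewrite | github.com/F5CodeGuru/asatoafmv2 | asatoafm.py | flipNetmask
-- ===== SOURCE A (Python) =====
-- def flipNetmask(mask):
--
-- 	flipDictionary = {"1":"0","0":"1",".":"."}
-- 	flippedMaskBin = ""
--
-- 	binaryRepresentation =  '.'.join([bin(int(x)+256)[3:] for x in mask.split('.')])
--
-- 	for bit in binaryRepresentation:
--
-- 		flippedMaskBin = flippedMaskBin + flipDictionary[bit]
--
-- 	flippedMaskDec = '.'.join([str((int(y,2))) for y in flippedMaskBin.split('.')])
--
-- 	return flippedMaskDec
-- ===== SOURCE B (Python) =====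
-- def flipNetmask(mask):
-- 	return '.'.join(str(255 - int(x)) for x in mask.split('.'))
-- ===== Notes on version B (the rewrite author's own statement) =====
-- stated objective: simpler
-- what changed: Each octet's wildcard value is computed directly as 255 - int(x); no binary string is built, no per-character dictionary flip, no base-2 re-parse.
-- outside the precondition, e.g. on flipNetmask('300'): A returns '467', B returns '-45'; on flipNetmask('-1'): A returns '0', B returns '256'
import Mathlib
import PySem

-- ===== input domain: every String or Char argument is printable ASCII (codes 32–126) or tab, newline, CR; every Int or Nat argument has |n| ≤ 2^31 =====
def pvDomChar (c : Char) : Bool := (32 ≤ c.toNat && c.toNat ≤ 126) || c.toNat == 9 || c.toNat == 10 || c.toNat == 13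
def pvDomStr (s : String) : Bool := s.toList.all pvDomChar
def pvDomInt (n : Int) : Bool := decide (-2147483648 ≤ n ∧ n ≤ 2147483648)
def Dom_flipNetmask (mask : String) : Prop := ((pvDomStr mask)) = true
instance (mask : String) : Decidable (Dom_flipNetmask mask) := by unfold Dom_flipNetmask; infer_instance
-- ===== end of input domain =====

-- B computes each wildcard octet directly as 255 - int(x) instead of A's binary-string
-- expansion, per-character dictionary flip and base-2 re-parse (objective: simpler).

-- ===== PORT A =====
-- flipDictionary = {"1":"0","0":"1",".":"."}
def pvFlipDict : PySem.Dict String String :=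
  ((PySem.Dict.empty.insert "1" "0").insert "0" "1").insert "." "."

-- flipDictionary[bit] (iterating a str yields 1-char strings); none = KeyError, never hit by bin() output
def pvFlipBit (bit : Char) : List Char :=
  match pvFlipDict.get? (String.ofList [bit]) with
  | some f => f.toList
  | none => []

-- bin(int(x)+256)[3:] ; none = ValueError of int(x), excluded by Pre_
def pvOctA (x : List Char) : List Char :=
  match PySem.Int.ofChars? x with
  | some n => PySem.List.slice (PySem.Int.toBinChars0b (n + 256)) (some 3) none
  | none => []

-- int(y, 2) then str(); none = ValueError, excluded by Pre_
def pvParseBinA (y : List Char) : List Char :=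
  match PySem.Int.ofCharsBase? y 2 with
  | some m => PySem.Int.toChars m
  | none => []

-- binaryRepresentation = '.'.join([pvOctA x for x in mask.split('.')]); flippedMaskBin = the
-- foldl accumulating flipDictionary[bit]; flippedMaskDec = '.'.join(str(int(y,2)) for y in split)
def flipNetmask (mask : String) : String :=
  String.ofList
    (PySem.Chars.join ['.']
      ((PySem.Chars.splitOn
          ((PySem.Chars.join ['.'] ((PySem.Chars.splitOn mask.toList ['.']).map pvOctA)).foldl
            (fun acc bit => acc ++ pvFlipBit bit) [])
          ['.']).map pvParseBinA))

-- ===== PORT B =====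
-- str(255 - int(x)); none = ValueError of int(x), excluded by Pre_
def pvOctB (x : List Char) : List Char :=
  match PySem.Int.ofChars? x with
  | some n => PySem.Int.toChars (255 - n)
  | none => []

def flipNetmask_alt (mask : String) : String :=
  String.ofList
    (PySem.Chars.join ['.'] ((PySem.Chars.splitOn mask.toList ['.']).map pvOctB))

-- ===== PRECONDITION & SPEC =====
-- Pre_ restricts to well-formed netmasks: every '.'-separated octet parses as an int in 0..255.
-- It excludes masks where int(x) raises ValueError (A raises there), and malformed masks with an
-- octet outside 0..255, on which A's hardcoded bin(int(x)+256)[3:] expansion is not the 8-bit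
-- complement form (A still returns a value there; see the cited examples).
def Pre_flipNetmask (mask : String) : Prop :=
  ∀ x ∈ PySem.Chars.splitOn mask.toList ['.'],
    ((PySem.Int.ofChars? x).elim false (fun n => 0 ≤ n && n ≤ 255)) = true
instance (mask : String) : Decidable (Pre_flipNetmask mask) := by
  unfold Pre_flipNetmask; infer_instance

def pvWitness_flipNetmask : String := "255.255.0.0"

def Spec_flipNetmask (mask : String) (out : String) : Prop := out = flipNetmask_alt mask
instance (mask : String) (out : String) : Decidable (Spec_flipNetmask mask out) := by
  unfold Spec_flipNetmask; infer_instance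

-- ===== CLAIM (what is proved, stated in full; the proofs are below) =====
def Claim_equal_flipNetmask : Prop :=
  ∀ (mask : String), Dom_flipNetmask mask → Pre_flipNetmask mask →
    Spec_flipNetmask mask (flipNetmask mask)

-- ===== LEMMAS AND PROOFS =====

-- Steps of PySem.Chars.splitOn.go for sep = ['.'].
lemma go_nil (fuel : Nat) (cur : List Char) (acc : List (List Char)) :
    PySem.Chars.splitOn.go ['.'] fuel [] cur acc = (cur.reverse :: acc).reverse := by
  cases fuel <;> simp [PySem.Chars.splitOn.go]

lemma go_dot (fuel : Nat) (l cur acc) :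
    PySem.Chars.splitOn.go ['.'] (fuel + 1) ('.' :: l) cur acc
      = PySem.Chars.splitOn.go ['.'] fuel l [] (cur.reverse :: acc) := by
  simp [PySem.Chars.splitOn.go, List.isPrefixOf]

lemma go_cons {c : Char} (hc : c ≠ '.') (fuel : Nat) (l cur acc) :
    PySem.Chars.splitOn.go ['.'] (fuel + 1) (c :: l) cur acc
      = PySem.Chars.splitOn.go ['.'] fuel l (c :: cur) acc := by
  simp [PySem.Chars.splitOn.go, List.isPrefixOf, (Ne.symm hc)]

-- Peeling a dot-free prefix.
lemma go_no_dot (p : List Char) (hp : '.' ∉ p) :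
    ∀ (fuel : Nat) (l cur acc),
      PySem.Chars.splitOn.go ['.'] (p.length + fuel) (p ++ l) cur acc
        = PySem.Chars.splitOn.go ['.'] fuel l (p.reverse ++ cur) acc := by
  induction p with
  | nil => intro fuel l cur acc; simp
  | cons c p ih =>
    intro fuel l cur acc
    have hc : c ≠ '.' := by rintro rfl; exact hp (List.mem_cons_self ..)
    have hp' : '.' ∉ p := fun h => hp (List.mem_cons_of_mem _ h)
    have harith : (c :: p).length + fuel = (p.length + fuel) + 1 := by
      simp [List.length_cons]; omega
    rw [harith, List.cons_append, go_cons hc, ih hp' fuel l (c :: cur) acc]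
    simp

-- go applied to a '.'-join of dot-free pieces returns the pieces (any extra fuel).
lemma go_join : ∀ (ps : List (List Char)), ps ≠ [] → (∀ p ∈ ps, '.' ∉ p) →
    ∀ (acc : List (List Char)) (fuel : Nat),
      PySem.Chars.splitOn.go ['.'] ((PySem.Chars.join ['.'] ps).length + 1 + fuel)
        (PySem.Chars.join ['.'] ps) [] acc = acc.reverse ++ ps := by
  intro ps
  induction ps with
  | nil => intro h; exact absurd rfl h
  | cons p ps ih =>
    intro _ hd acc fuel
    cases ps with
    | nil =>
      have h1 : p.length + 1 + fuel = p.length + (1 + fuel) := by omega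
      have h2 := go_no_dot p (hd p (by simp)) (1 + fuel) [] [] acc
      simp only [List.append_nil] at h2
      rw [PySem.Chars.join_singleton, h1, h2, go_nil]
      simp
    | cons q ps' =>
      rw [PySem.Chars.join_cons_cons]
      have hlen : (p ++ ['.'] ++ PySem.Chars.join ['.'] (q :: ps')).length + 1 + fuel
          = p.length + (((PySem.Chars.join ['.'] (q :: ps')).length + 1 + fuel) + 1) := by
        simp [List.length_append]; omega
      rw [hlen, List.append_assoc, List.singleton_append,
        go_no_dot p (hd p (by simp)) _ _ [] acc, go_dot]
      rw [ih (by simp) (fun r hr => hd r (by simp [hr])) _ fuel]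
      simp

-- '.'-split of a '.'-join of dot-free pieces is the identity.
lemma splitOn_join (ps : List (List Char)) (hne : ps ≠ []) (hd : ∀ p ∈ ps, '.' ∉ p) :
    PySem.Chars.splitOn (PySem.Chars.join ['.'] ps) ['.'] = ps := by
  have := go_join ps hne hd [] 0
  simpa [PySem.Chars.splitOn] using this

-- splitOn never returns the empty list (Python split always yields at least one piece).
lemma go_ne_nil : ∀ (fuel : Nat) (l cur : List Char) (acc : List (List Char)),
    PySem.Chars.splitOn.go ['.'] fuel l cur acc ≠ [] := by
  intro fuel
  induction fuel with
  | zero => intro l cur acc; simp [PySem.Chars.splitOn.go]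
  | succ fuel ih =>
    intro l cur acc
    cases l with
    | nil => rw [go_nil]; simp
    | cons c l =>
      by_cases hc : c = '.'
      · subst hc; rw [go_dot]; exact ih _ _ _
      · rw [go_cons hc]; exact ih _ _ _

lemma splitOn_ne_nil (s : List Char) : PySem.Chars.splitOn s ['.'] ≠ [] := by
  simpa [PySem.Chars.splitOn] using go_ne_nil (s.length + 1) s [] []

-- flatMap distributes over a '.'-join when the function fixes '.'.
lemma flatMap_join (f : Char → List Char) (hf : f '.' = ['.']) :
    ∀ (ps : List (List Char)),
      (PySem.Chars.join ['.'] ps).flatMap f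
        = PySem.Chars.join ['.'] (ps.map (fun p => p.flatMap f)) := by
  intro ps
  induction ps with
  | nil => simp [PySem.Chars.join_nil]
  | cons p ps ih =>
    cases ps with
    | nil => simp [PySem.Chars.join_singleton]
    | cons q ps' =>
      rw [PySem.Chars.join_cons_cons, List.flatMap_append, List.flatMap_append, ih]
      simp [hf, PySem.Chars.join_cons_cons]

-- The per-octet core, checked for all 256 byte values: the flipped 8-bit expansion of n has no
-- dot, and re-parsing it in base 2 gives 255 - n.
set_option maxRecDepth 8192 in
lemma octet_fin : ∀ k : Fin 256,
    ('.' ∉ (PySem.List.slice (PySem.Int.toBinChars0b ((k : Int) + 256)) (some 3) none).flatMap pvFlipBit) ∧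
    pvParseBinA ((PySem.List.slice (PySem.Int.toBinChars0b ((k : Int) + 256)) (some 3) none).flatMap pvFlipBit)
      = PySem.Int.toChars (255 - (k : Int)) := by
  decide

lemma octet_core (n : Int) (h0 : 0 ≤ n) (h1 : n ≤ 255) :
    ('.' ∉ (PySem.List.slice (PySem.Int.toBinChars0b (n + 256)) (some 3) none).flatMap pvFlipBit) ∧
    pvParseBinA ((PySem.List.slice (PySem.Int.toBinChars0b (n + 256)) (some 3) none).flatMap pvFlipBit)
      = PySem.Int.toChars (255 - n) := by
  have h := octet_fin ⟨n.toNat, by omega⟩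
  have hn : ((⟨n.toNat, by omega⟩ : Fin 256) : Int) = n := by
    simp [Int.toNat_of_nonneg h0]
  rwa [hn] at h

lemma pvFlipBit_dot : pvFlipBit '.' = ['.'] := by decide

theorem flipNetmask_main (mask : String) (hpre : Pre_flipNetmask mask) :
    flipNetmask mask = flipNetmask_alt mask := by
  unfold flipNetmask flipNetmask_alt
  set ps := PySem.Chars.splitOn mask.toList ['.'] with hps
  -- the accumulating string concat is a flatMap
  rw [PySem.List.foldl_append_eq_flatMap pvFlipBit _ []]
  rw [List.nil_append, flatMap_join pvFlipBit pvFlipBit_dot]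
  rw [List.map_map]
  simp only [Function.comp_def]
  have hne : ps ≠ [] := hps ▸ splitOn_ne_nil mask.toList
  -- the flipped pieces are dot-free, so the second split undoes the join
  have hdotfree : ∀ r ∈ ps.map (fun p => (pvOctA p).flatMap pvFlipBit), '.' ∉ r := by
    intro r hr
    obtain ⟨x, hx, rfl⟩ := List.mem_map.mp hr
    have hxp := hpre x hx
    cases hof : PySem.Int.ofChars? x with
    | none => rw [hof] at hxp; simp at hxp
    | some n =>
      rw [hof] at hxp
      simp at hxp
      simp only [pvOctA, hof]
      exact (octet_core n hxp.1 hxp.2).1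
  rw [splitOn_join _ (by simpa using hne) hdotfree]
  rw [List.map_map]
  simp only [Function.comp_def]
  have hmap : List.map (fun x => pvParseBinA (List.flatMap pvFlipBit (pvOctA x))) ps
      = List.map pvOctB ps := by
    apply List.map_congr_left
    intro x hx
    have hxp := hpre x hx
    cases hof : PySem.Int.ofChars? x with
    | none => rw [hof] at hxp; simp at hxp
    | some n =>
      rw [hof] at hxp
      simp at hxp
      simp only [pvOctA, pvOctB, hof]
      exact (octet_core n hxp.1 hxp.2).2
  rw [hmap]

-- ===== VERDICT (by name: the statement is the Claim_ definition above) =====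
theorem flipNetmask_spec : Claim_equal_flipNetmask := by
  intro mask _ hpre
  exact flipNetmask_main mask hpre
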